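-- pv_equiv track=rewrite | github.com/yezhang4528/USACO | training/chapter1/sec_1_2/beads/beads.py | replaceSureW
-- ===== SOURCE A (Python) =====
-- def replaceW(beadLine, curIndex, curColor):
--     numReplaced = 0
--     for i in range(curIndex, len(beadLine)):
--         if beadLine[i] == 'w':
--             beadLine[i] = curColor
--             numReplaced += 1
--         else:
--             break
--     return numReplaced
--
-- def findNextColor(beadLine, index):
--     for i in range(index, len(beadLine)):
--         if beadLine[i] != 'w':
--             return beadLine[i]
--     return ''
--
-- def replaceSureW(beadLine):
--     curColor = ''
--     i = 0
--     while i < len(beadLine):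
--         if curColor == '' and beadLine[i] == 'w':
--             i += 1
--             continue
--
--         if beadLine[i] != 'w':
--             curColor = beadLine[i]
--             i += 1
--             continue
--
--         if beadLine[i] == 'w':
--             nextColor = findNextColor(beadLine, i)
--             if curColor == nextColor:
--                 n = replaceW(beadLine, i, curColor)
--                 i += n
--             else:
--                 i += 1
--     return beadLine
-- ===== SOURCE B (Python) =====
-- # Alternative two-pass version: a backward pass records the next non-white color
-- # at each position, then one forward scan fills a 'w' with the previous color when
-- # it equals the next one. Mutates beadLine in place and returns it, like the original.
-- def replaceSureW(beadLine):
--     n = len(beadLine)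
--     nxt = [''] * n
--     nc = ''
--     for i in range(n - 1, -1, -1):
--         if beadLine[i] != 'w':
--             nc = beadLine[i]
--         nxt[i] = nc
--     prev = ''
--     for i in range(n):
--         if beadLine[i] != 'w':
--             prev = beadLine[i]
--         elif prev != '' and prev == nxt[i]:
--             beadLine[i] = prev
--     return beadLine
-- ===== Notes on version B (the rewrite author's own statement) =====
-- stated objective: alternative
-- what changed: Replaced the index-jumping while loop that rescans forward for the next color and re-walks each white run in place by two linear passes: a backward pass precomputing the next non-white color per position, then one forward scan filling whites where the previous color equals the next; quadratic rescans disappear but measured speed is about the same.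
import Mathlib
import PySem

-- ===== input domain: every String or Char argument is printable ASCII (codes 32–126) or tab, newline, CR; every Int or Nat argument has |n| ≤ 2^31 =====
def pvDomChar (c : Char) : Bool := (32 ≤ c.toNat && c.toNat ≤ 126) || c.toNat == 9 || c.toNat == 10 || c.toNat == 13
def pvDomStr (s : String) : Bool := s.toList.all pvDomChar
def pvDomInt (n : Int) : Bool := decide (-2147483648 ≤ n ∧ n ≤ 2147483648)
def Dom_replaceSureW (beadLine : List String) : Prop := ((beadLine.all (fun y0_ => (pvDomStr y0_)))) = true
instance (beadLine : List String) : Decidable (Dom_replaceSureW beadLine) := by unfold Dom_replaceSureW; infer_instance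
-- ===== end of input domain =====

-- B replaces A's rescanning while loop by two linear passes (a backward next-color pass, then a
-- forward fill pass); both Pythons mutate the list in place, the theorems are about the return value.

-- ===== PORT A =====
-- A's loops scan by index; the extra fuel argument (enough at every call: the number of
-- remaining indices) only makes the same index recursion total, it never changes a value.

-- Python replaceW: from index i, overwrite the run of 'w' with curColor, return the count.
def replaceW : Nat → List String → Nat → String → List String × Nat
  | 0, bl, _, _ => (bl, 0)
  | fuel + 1, bl, i, c =>
    if i < bl.length then
      if bl.getD i "" = "w" then
        ((replaceW fuel (bl.set i c) (i + 1) c).1, (replaceW fuel (bl.set i c) (i + 1) c).2 + 1)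
      else (bl, 0)
    else (bl, 0)

-- Python findNextColor: first non-'w' entry at or after index i, '' if none.
def findNextColor : Nat → List String → Nat → String
  | 0, _, _ => ""
  | fuel + 1, bl, i =>
    if i < bl.length then
      if bl.getD i "" ≠ "w" then bl.getD i "" else findNextColor fuel bl (i + 1)
    else ""

-- Python replaceSureW's while loop (state: list, curColor, index)
def sureLoop : Nat → List String → String → Nat → List String
  | 0, bl, _, _ => bl
  | fuel + 1, bl, cur, i =>
    if i < bl.length then
      if cur = "" ∧ bl.getD i "" = "w" then sureLoop fuel bl cur (i + 1)
      else if bl.getD i "" ≠ "w" then sureLoop fuel bl (bl.getD i "") (i + 1)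
      else
        if cur = findNextColor (bl.length - i) bl i then
          sureLoop fuel (replaceW (bl.length - i) bl i cur).1 cur
            (i + (replaceW (bl.length - i) bl i cur).2)
        else sureLoop fuel bl cur (i + 1)
    else bl

def replaceSureW (beadLine : List String) : List String :=
  sureLoop beadLine.length beadLine "" 0

-- ===== PORT B =====

-- backward pass of Source B: per-position next non-white color, plus the running color
def buildNxt : List String → List String × String
  | [] => ([], "")
  | b :: bs =>
    let p := buildNxt bs
    let nc := if b ≠ "w" then b else p.2
    (nc :: p.1, nc)

-- forward pass of Source B
def fillPass : List String → List String → String → List String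
  | b :: bs, nx :: nxs, prev =>
    if b ≠ "w" then b :: fillPass bs nxs b
    else if prev ≠ "" ∧ prev = nx then prev :: fillPass bs nxs prev
    else b :: fillPass bs nxs prev
  | _, _, _ => []

def replaceSureW_alt (beadLine : List String) : List String :=
  fillPass beadLine (buildNxt beadLine).1 ""

-- ===== PRECONDITION & SPEC =====
def Spec_replaceSureW (beadLine : List String) (out : List String) : Prop := out = replaceSureW_alt beadLine
instance (beadLine : List String) (out : List String) : Decidable (Spec_replaceSureW beadLine out) := by unfold Spec_replaceSureW; infer_instance

-- ===== CLAIM (what is proved, stated in full; the proofs are below) =====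
def Claim_equal_replaceSureW : Prop := ∀ (beadLine : List String), Dom_replaceSureW beadLine → Spec_replaceSureW beadLine (replaceSureW beadLine)

-- ===== LEMMAS AND PROOFS =====

-- reference function both ports are reduced to
def firstNonW : List String → String
  | [] => ""
  | b :: bs => if b ≠ "w" then b else firstNonW bs

def wRun : List String → Nat
  | [] => 0
  | b :: bs => if b = "w" then wRun bs + 1 else 0

def repW (c : String) : List String → List String
  | [] => []
  | b :: bs => if b = "w" then c :: repW c bs else b :: bs

def G (cur : String) : List String → List String
  | [] => []
  | b :: bs =>
    if cur = "" ∧ b = "w" then b :: G cur bs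
    else if b ≠ "w" then b :: G b bs
    else if cur = firstNonW (b :: bs) then cur :: G cur bs
    else b :: G cur bs

theorem wRun_le (xs : List String) : wRun xs ≤ xs.length := by
  induction xs with
  | nil => simp [wRun]
  | cons b bs ih =>
    by_cases hb : b = "w"
    · simp [wRun, hb]; omega
    · simp [wRun, hb]

theorem findNextColor_eq (fuel : Nat) (bl : List String) (i : Nat)
    (hf : bl.length ≤ i + fuel) :
    findNextColor fuel bl i = firstNonW (bl.drop i) := by
  induction fuel generalizing i with
  | zero =>
    rw [findNextColor, List.drop_eq_nil_of_le (by omega)]; rfl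
  | succ fuel ih =>
    rw [findNextColor]
    by_cases h : i < bl.length
    · rw [if_pos h, List.drop_eq_getElem_cons h, firstNonW,
          List.getD_eq_getElem bl "" h]
      split
      · rfl
      · exact ih (i + 1) (by omega)
    · rw [if_neg h, List.drop_eq_nil_of_le (by omega)]; rfl

theorem repW_eq (c : String) (xs : List String) :
    repW c xs = List.replicate (wRun xs) c ++ xs.drop (wRun xs) := by
  induction xs with
  | nil => rfl
  | cons b bs ih =>
    by_cases hb : b = "w"
    · simp [repW, wRun, hb, List.replicate_succ, ih]
    · simp [repW, wRun, hb]

theorem replaceW_eq (fuel : Nat) (bl : List String) (i : Nat) (c : String)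
    (hf : bl.length ≤ i + fuel) :
    replaceW fuel bl i c = (bl.take i ++ repW c (bl.drop i), wRun (bl.drop i)) := by
  induction fuel generalizing bl i with
  | zero =>
    rw [replaceW, List.drop_eq_nil_of_le (by omega),
        List.take_of_length_le (by omega)]
    simp [repW, wRun]
  | succ fuel ih =>
    rw [replaceW]
    by_cases h : i < bl.length
    · rw [if_pos h, List.getD_eq_getElem bl "" h]
      by_cases hw : bl[i] = "w"
      · rw [if_pos hw]
        have ihs := ih (bl.set i c) (i + 1) (by simp; omega)
        have ht : (bl.set i c).take (i + 1) = bl.take i ++ [c] := by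
          rw [List.set_eq_take_cons_drop c h, List.take_append, List.take_take]
          have h1 : min (i + 1) i = i := by omega
          have h2 : i + 1 - (List.take i bl).length = 1 := by
            simp [List.length_take]; omega
          rw [h1, h2]
          simp
        have hd : (bl.set i c).drop (i + 1) = bl.drop (i + 1) := by
          rw [List.drop_set]; simp
        rw [ihs, ht, hd]
        rw [List.drop_eq_getElem_cons h, repW, wRun]
        simp [hw]
      · rw [if_neg hw]
        rw [List.drop_eq_getElem_cons h, repW, wRun]
        simp [hw, ← List.drop_eq_getElem_cons h]
    · rw [if_neg h, List.drop_eq_nil_of_le (by omega),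
          List.take_of_length_le (by omega)]
      simp [repW, wRun]

-- G over a leading white run whose surrounding colors agree
theorem G_run (cur : String) (xs : List String) (hne : cur ≠ "")
    (hfc : cur = firstNonW xs) :
    G cur xs = List.replicate (wRun xs) cur ++ G cur (xs.drop (wRun xs)) := by
  induction xs with
  | nil => simp [wRun, G]
  | cons b bs ih =>
    by_cases hb : b = "w"
    · subst hb
      have hfc' : cur = firstNonW bs := by simpa [firstNonW] using hfc
      rw [G, if_neg (by simp [hne]), if_neg (by simp), if_pos hfc]
      rw [wRun, if_pos rfl, List.replicate_succ, ih hfc']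
      simp
    · simp [wRun, hb]

theorem sureLoop_eq (fuel : Nat) (bl : List String) (cur : String) (i : Nat)
    (hf : bl.length ≤ i + fuel) :
    sureLoop fuel bl cur i = bl.take i ++ G cur (bl.drop i) := by
  induction fuel generalizing bl cur i with
  | zero =>
    rw [sureLoop, List.drop_eq_nil_of_le (by omega),
        List.take_of_length_le (by omega)]
    simp [G]
  | succ fuel ih =>
    rw [sureLoop]
    by_cases h : i < bl.length
    · rw [if_pos h, List.getD_eq_getElem bl "" h]
      have hdrop : bl.drop i = bl[i] :: bl.drop (i + 1) := List.drop_eq_getElem_cons h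
      have htake : bl.take (i + 1) = bl.take i ++ [bl[i]] := by
        rw [List.take_add_one]
        simp [List.getElem?_eq_getElem h]
      by_cases hc : cur = "" ∧ bl[i] = "w"
      · rw [if_pos hc, ih bl cur (i + 1) (by omega), hdrop, G, if_pos hc,
            htake, List.append_assoc]
        rfl
      · rw [if_neg hc]
        by_cases hw : bl[i] ≠ "w"
        · rw [if_pos hw, ih bl (bl[i]) (i + 1) (by omega), hdrop, G,
              if_neg (by simp [hw]), if_pos hw, htake, List.append_assoc]
          rfl
        · rw [if_neg hw]
          have hbw : bl[i] = "w" := by simpa using hw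
          have hcne : cur ≠ "" := fun hc0 => hc ⟨hc0, hbw⟩
          rw [findNextColor_eq (bl.length - i) bl i (by omega)]
          by_cases hnc : cur = firstNonW (bl.drop i)
          · rw [if_pos hnc,
                replaceW_eq (bl.length - i) bl i cur (by omega)]
            have hti : (bl.take i).length = i := by simp; omega
            have hn1 : 1 ≤ wRun (bl.drop i) := by
              rw [hdrop, wRun, if_pos hbw]; omega
            have hnle : wRun (bl.drop i) ≤ bl.length - i := by
              have h1 := wRun_le (bl.drop i)
              simpa using h1
            have hsplit : bl.take i ++ repW cur (bl.drop i)
                = bl.take i ++ (List.replicate (wRun (bl.drop i)) cur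
                    ++ bl.drop (i + wRun (bl.drop i))) := by
              rw [repW_eq, List.drop_drop, Nat.add_comm]
            have hlen' : (bl.take i ++ repW cur (bl.drop i)).length = bl.length := by
              rw [hsplit]
              simp [hti]
              omega
            have hlr : (bl.take i ++ List.replicate (wRun (bl.drop i)) cur).length
                = i + wRun (bl.drop i) := by simp [hti]
            rw [ih (bl.take i ++ repW cur (bl.drop i)) cur (i + wRun (bl.drop i))
                  (by rw [hlen']; omega)]
            rw [hsplit, ← List.append_assoc, List.take_left' hlr, List.drop_left' hlr,
                G_run cur (bl.drop i) hcne hnc, List.drop_drop]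
            simp [List.append_assoc]
          · rw [if_neg hnc, ih bl cur (i + 1) (by omega), hdrop, G,
                if_neg (by rintro ⟨h1, h2⟩; exact hc ⟨h1, h2⟩),
                if_neg (by simpa using hbw), if_neg (by rw [← hdrop]; exact hnc),
                htake, List.append_assoc]
            rfl
    · rw [if_neg h, List.drop_eq_nil_of_le (by omega),
          List.take_of_length_le (by omega)]
      simp [G]

theorem buildNxt_snd (xs : List String) : (buildNxt xs).2 = firstNonW xs := by
  induction xs with
  | nil => rfl
  | cons b bs ih => simp [buildNxt, firstNonW, ih]

theorem fillPass_eq (xs : List String) (prev : String) :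
    fillPass xs (buildNxt xs).1 prev = G prev xs := by
  induction xs generalizing prev with
  | nil => rfl
  | cons b bs ih =>
    have hhd : (buildNxt (b :: bs)).1 = firstNonW (b :: bs) :: (buildNxt bs).1 := by
      simp [buildNxt, buildNxt_snd, firstNonW]
    rw [hhd]
    by_cases hb : b = "w"
    · subst hb
      have hfw : firstNonW ("w" :: bs) = firstNonW bs := by simp [firstNonW]
      by_cases hp : prev ≠ "" ∧ prev = firstNonW ("w" :: bs)
      · rw [fillPass, if_neg (by simp), if_pos (by rw [hfw] at hp ⊢; exact hp)]
        rw [G, if_neg (by simp [hp.1]), if_neg (by simp), if_pos hp.2, ih]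
      · rw [fillPass, if_neg (by simp), if_neg (by rw [hfw] at hp ⊢; exact hp), ih]
        rw [G]
        by_cases hp0 : prev = ""
        · rw [if_pos ⟨hp0, rfl⟩]
        · rw [if_neg (by simp [hp0]), if_neg (by simp),
              if_neg (fun hx => hp ⟨hp0, hx⟩)]
    · rw [fillPass, if_pos hb, ih, G, if_neg (by simp [hb]), if_pos hb]

-- ===== VERDICT (by name: the statement is the Claim_ definition above) =====
theorem replaceSureW_spec : Claim_equal_replaceSureW := by
  intro bl _
  unfold Spec_replaceSureW replaceSureW replaceSureW_alt
  rw [sureLoop_eq bl.length bl "" 0 (by omega), fillPass_eq]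
  simp
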